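-- pv_equiv track=rewrite | github.com/yaolisi/perilla | backend/scripts/chaos_report_summary.py | _parse_total_from_actual
-- ===== SOURCE A (Python) =====
-- from typing import Any, Dict, List, Optional, Tuple
--
-- def _parse_total_from_actual(actual: str) -> Optional[int]:
--     for part in (actual or "").split(","):
--         p = part.strip()
--         if p.startswith("total="):
--             value = p.split("=", 1)[1].strip()
--             try:
--                 return int(value)
--             except Exception:
--                 return None
--     return None
-- ===== SOURCE B (Python) =====
-- def _parse_total_from_actual(actual):
--     table = {}
--     for part in (actual or "").split(","):
--         kv = part.strip().split("=", 1)
--         if len(kv) == 2 and kv[0] not in table: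
--             table[kv[0]] = kv[1]
--     if "total" not in table:
--         return None
--     try:
--         return int(table["total"].strip())
--     except Exception:
--         return None
-- ===== Notes on version B (the rewrite author's own statement) =====
-- stated objective: alternative
-- what changed: A scans the comma-separated parts and early-returns at the first part whose stripped text starts with the target key plus an equals sign; B first builds a first-occurrence key->value table from all parts (splitting each on the first equals sign), then queries the table for the exact target key and int-parses the stripped value.
import Mathlib
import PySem

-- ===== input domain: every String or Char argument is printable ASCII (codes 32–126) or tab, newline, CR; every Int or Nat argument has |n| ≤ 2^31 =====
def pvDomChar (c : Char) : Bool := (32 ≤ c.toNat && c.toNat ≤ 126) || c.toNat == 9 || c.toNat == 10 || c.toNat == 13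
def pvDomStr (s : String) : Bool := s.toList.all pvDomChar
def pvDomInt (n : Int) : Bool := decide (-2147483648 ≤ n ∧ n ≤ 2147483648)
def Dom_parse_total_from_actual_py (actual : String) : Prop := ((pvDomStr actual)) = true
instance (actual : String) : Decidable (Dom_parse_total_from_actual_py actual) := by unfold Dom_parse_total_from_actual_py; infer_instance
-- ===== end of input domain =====

-- B builds a first-occurrence key/value table from all parts and then queries it for the target key,
-- instead of A's early-returning scan for a matching part. Same cost; alternative decomposition.

-- ===== PORT A =====
-- the for-loop with its early return
def goA : List (List Char) → Option Int
  | [] => none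
  | part :: rest =>
    let p := PySem.Chars.strip part
    if PySem.Chars.startswith p ("total=".toList) then
      -- value = p.split("=", 1)[1].strip(); int(value) with try/except → Option
      match PySem.List.pyGet? (PySem.Chars.splitOnMax p ['='] 1) 1 with
      | some w => PySem.Int.ofChars? (PySem.Chars.strip w)
      | none => none
    else goA rest

def parse_total_from_actual_py (actual : String) : Option Int :=
  let cs := actual.toList
  -- (actual or "") : the empty string is falsy
  goA (PySem.Chars.splitOn (if cs.isEmpty then [] else cs) [','])

-- ===== PORT B =====
-- one loop iteration: record kv[0] -> kv[1] only on first occurrence of the key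
def stepB (d : PySem.Dict (List Char) (List Char)) (part : List Char) : PySem.Dict (List Char) (List Char) :=
  match PySem.Chars.splitOnMax (PySem.Chars.strip part) ['='] 1 with
  | [k, v] => if d.contains k then d else d.insert k v
  | _ => d

def parse_total_from_actual_py_alt (actual : String) : Option Int :=
  let cs := actual.toList
  let table := (PySem.Chars.splitOn (if cs.isEmpty then [] else cs) [',']).foldl stepB PySem.Dict.empty
  if table.contains ("total".toList) = false then none
  else
    match table.get? ("total".toList) with
    | some v => PySem.Int.ofChars? (PySem.Chars.strip v)
    | none => none

-- ===== PRECONDITION & SPEC =====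
def Spec_parse_total_from_actual_py (actual : String) (out : Option Int) : Prop := out = parse_total_from_actual_py_alt actual
instance (actual : String) (out : Option Int) : Decidable (Spec_parse_total_from_actual_py actual out) := by unfold Spec_parse_total_from_actual_py; infer_instance

-- ===== CLAIM (what is proved, stated in full; the proofs are below) =====
def Claim_equal_parse_total_from_actual_py : Prop := ∀ (actual : String), Dom_parse_total_from_actual_py actual → Spec_parse_total_from_actual_py actual (parse_total_from_actual_py actual)

-- ===== LEMMAS AND PROOFS =====

def keyT : List Char := "total".toList

-- B's query of a finished table (definitionally the tail of parse_total_from_actual_py_alt)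
def resB (d : PySem.Dict (List Char) (List Char)) : Option Int :=
  if d.contains keyT = false then none
  else
    match d.get? keyT with
    | some v => PySem.Int.ofChars? (PySem.Chars.strip v)
    | none => none

theorem go_m0 (fuel : Nat) (l cur : List Char) (acc : List (List Char)) :
    PySem.Chars.splitOnMax.go ['='] fuel 0 l cur acc = ((cur.reverse ++ l) :: acc).reverse := by
  cases fuel with
  | zero => simp [PySem.Chars.splitOnMax.go]
  | succ f => cases l <;> simp [PySem.Chars.splitOnMax.go]

theorem go_spec (p : List Char) : ∀ (fuel : Nat) (cur : List Char) (acc : List (List Char)),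
    p.length < fuel →
    PySem.Chars.splitOnMax.go ['='] fuel 1 p cur acc =
      match p.dropWhile (· != '=') with
      | [] => ((cur.reverse ++ p) :: acc).reverse
      | _ :: v => acc.reverse ++ [cur.reverse ++ p.takeWhile (· != '='), v] := by
  induction p with
  | nil =>
    intro fuel cur acc h
    match fuel, h with
    | f+1, _ => simp [PySem.Chars.splitOnMax.go]
  | cons c rest ih =>
    intro fuel cur acc h
    match fuel, h with
    | f+1, h =>
      by_cases hc : c = '='
      · subst hc
        simp only [PySem.Chars.splitOnMax.go, List.isPrefixOf, if_neg (by decide : ¬(1 = 0))]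
        simp [go_m0, List.dropWhile]
      · simp only [PySem.Chars.splitOnMax.go]
        rw [if_neg (by decide : ¬(1 = 0))]
        rw [if_neg]
        · rw [ih f (c :: cur) acc (by simpa using h)]
          have hb : (c != '=') = true := by simp [hc]
          simp only [List.dropWhile, List.takeWhile, hb]
          cases hdw : rest.dropWhile (· != '=') <;> simp
        · simp [List.isPrefixOf]
          intro h'; exact hc h'.symm

theorem splitOnMax_eq (p : List Char) :
    PySem.Chars.splitOnMax p ['='] 1 =
      match p.dropWhile (· != '=') with
      | [] => [p]
      | _ :: v => [p.takeWhile (· != '='), v] := by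
  have := go_spec p (p.length + 1) [] [] (by omega)
  simp only [PySem.Chars.splitOnMax] at *
  rw [if_neg (by decide)]
  simpa using this

theorem prefix_key (a : List Char) : ∀ (t v w : List Char), '=' ∉ a → '=' ∉ t →
    (a ++ '=' :: w) <+: (t ++ '=' :: v) → t = a := by
  induction a with
  | nil =>
    intro t v w _ ht hp
    cases t with
    | nil => rfl
    | cons c t' =>
      exfalso
      rcases hp with ⟨u, hu⟩
      simp at hu
      exact ht (by simp [← hu.1])
  | cons x a' ih =>
    intro t v w ha ht hp
    cases t with
    | nil =>
      exfalso
      rcases hp with ⟨u, hu⟩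
      simp at hu
      exact ha (by simp [hu.1])
    | cons c t' =>
      rcases hp with ⟨u, hu⟩
      simp at hu
      obtain ⟨rfl, hu2⟩ := hu
      have : t' = a' := ih t' v w (fun h => ha (List.mem_cons_of_mem _ h)) (fun h => ht (List.mem_cons_of_mem _ h)) ⟨u, by simpa using hu2⟩
      simp [this]

theorem dropWhile_head_false {q : Char → Bool} {c : Char} {v : List Char} :
    ∀ (p : List Char), p.dropWhile q = c :: v → q c = false := by
  intro p
  induction p with
  | nil => intro h; simp at h
  | cons x xs ih =>
    intro h
    by_cases hx : q x
    · exact ih (by simpa [List.dropWhile, hx] using h)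
    · simp [List.dropWhile, hx] at h
      rw [← h.1]; simpa using hx

theorem startswith_false_of_no_eq (p : List Char) (h : p.dropWhile (· != '=') = []) :
    PySem.Chars.startswith p ("total=".toList) = false := by
  by_contra hs
  have hs' : PySem.Chars.startswith p ("total=".toList) = true := by
    cases hb : PySem.Chars.startswith p ("total=".toList) <;> simp_all
  have hpre := (PySem.Chars.startswith_iff p _).mp hs'
  have hmem : '=' ∈ p := hpre.subset (by decide)
  have := List.dropWhile_eq_nil_iff.mp h '=' hmem
  simp at this

theorem startswith_iff_key (p : List Char) (c : Char) (v : List Char)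
    (h : p.dropWhile (· != '=') = c :: v) :
    PySem.Chars.startswith p ("total=".toList) = true ↔ p.takeWhile (· != '=') = keyT := by
  have hc : c = '=' := by
    have := dropWhile_head_false p h
    simpa using this
  subst hc
  have hdec : p = p.takeWhile (· != '=') ++ '=' :: v := by
    conv_lhs => rw [← List.takeWhile_append_dropWhile (p := (· != '=')) (l := p)]
    rw [h]
  have hnt : '=' ∉ p.takeWhile (· != '=') := by
    intro hm
    have := List.mem_takeWhile_imp hm
    simp at this
  constructor
  · intro hs
    have hpre := (PySem.Chars.startswith_iff p _).mp hs
    rw [hdec] at hpre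
    have : ("total=".toList) = keyT ++ '=' :: ([] : List Char) := by decide
    rw [this] at hpre
    exact prefix_key keyT (p.takeWhile (· != '=')) v [] (by decide) hnt hpre
  · intro ht
    rw [PySem.Chars.startswith_iff, hdec, ht]
    exact ⟨v, by simp [keyT]⟩

theorem stepB_get?_some (d : PySem.Dict (List Char) (List Char)) (part : List Char)
    {x : List Char} {w : List Char} (hx : d.get? x = some w) :
    (stepB d part).get? x = some w := by
  unfold stepB
  cases hkv : PySem.Chars.splitOnMax (PySem.Chars.strip part) ['='] 1 with
  | nil => exact hx
  | cons k kv' =>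
    cases kv' with
    | nil => exact hx
    | cons v kv'' =>
      cases kv'' with
      | nil =>
        by_cases hck : d.contains k
        · simp [hck, hx]
        · have hne : x ≠ k := by
            intro hxe; subst hxe
            rw [PySem.Dict.contains_eq_isSome_get?, hx] at hck
            simp at hck
          simp [hck, PySem.Dict.get?_insert, hne, hx]
      | cons _ _ => exact hx

theorem foldl_stepB_get?_some (parts : List (List Char)) :
    ∀ (d : PySem.Dict (List Char) (List Char)) {w : List Char},
    d.get? keyT = some w → (parts.foldl stepB d).get? keyT = some w := by
  induction parts with
  | nil => intro d w h; simpa using h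
  | cons part rest ih =>
    intro d w h
    simpa using ih (stepB d part) (stepB_get?_some d part h)

theorem fold_main (parts : List (List Char)) :
    ∀ (d : PySem.Dict (List Char) (List Char)), d.get? keyT = none →
    resB (parts.foldl stepB d) = goA parts := by
  induction parts with
  | nil =>
    intro d h
    simp [goA, resB, PySem.Dict.contains_eq_isSome_get?, h]
  | cons part rest ih =>
    intro d h
    simp only [List.foldl_cons, goA]
    cases hdw : (PySem.Chars.strip part).dropWhile (· != '=') with
    | nil =>
      rw [startswith_false_of_no_eq _ hdw]
      simp only [Bool.false_eq_true, if_false]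
      have hstep : stepB d part = d := by
        unfold stepB
        rw [splitOnMax_eq, hdw]
      rw [hstep]
      exact ih d h
    | cons c v =>
      have hkv : PySem.Chars.splitOnMax (PySem.Chars.strip part) ['='] 1 =
          [(PySem.Chars.strip part).takeWhile (· != '='), v] := by
        rw [splitOnMax_eq, hdw]
      by_cases htk : (PySem.Chars.strip part).takeWhile (· != '=') = keyT
      · rw [(startswith_iff_key _ c v hdw).mpr htk]
        simp only [if_true]
        have hcont : d.contains keyT = false := by
          rw [PySem.Dict.contains_eq_isSome_get?, h]; rfl
        have hstep : stepB d part = d.insert keyT v := by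
          unfold stepB
          rw [hkv, htk]
          simp [hcont]
        rw [hstep]
        have hget : ((rest.foldl stepB (d.insert keyT v)).get? keyT) = some v :=
          foldl_stepB_get?_some rest _ (PySem.Dict.get?_insert_self d keyT v)
        rw [hkv]
        simp only [PySem.List.pyGet?]
        unfold resB
        rw [PySem.Dict.contains_eq_isSome_get?, hget]
        simp [PySem.List.pyIdx?]
      · have hsw : PySem.Chars.startswith (PySem.Chars.strip part) ("total=".toList) = false := by
          cases hb : PySem.Chars.startswith (PySem.Chars.strip part) ("total=".toList)
          · rfl
          · exact absurd ((startswith_iff_key _ c v hdw).mp hb) htk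
        rw [hsw]
        simp only [Bool.false_eq_true, if_false]
        have hnext : (stepB d part).get? keyT = none := by
          unfold stepB
          rw [hkv]
          by_cases hck : d.contains ((PySem.Chars.strip part).takeWhile (· != '='))
          · simpa [hck] using h
          · have hne : keyT ≠ (PySem.Chars.strip part).takeWhile (· != '=') := fun he => htk he.symm
            simp [hck, PySem.Dict.get?_insert, hne, h]
        exact ih _ hnext

-- ===== VERDICT (by name: the statement is the Claim_ definition above) =====
theorem parse_total_from_actual_py_spec : Claim_equal_parse_total_from_actual_py := by
  intro actual _
  unfold Spec_parse_total_from_actual_py parse_total_from_actual_py parse_total_from_actual_py_alt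
  simp only []
  rw [← fold_main _ PySem.Dict.empty (by simp [pysem])]
  rfl
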